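-- pv_equiv track=rewrite | github.com/Sana-ai-coder/Elevate | backend/seed_questions.py | _split_count_across_difficulties
-- ===== SOURCE A (Python) =====
-- def _split_count_across_difficulties(total: int, include_expert: bool):
--     levels = ["easy", "medium", "hard"] + (["expert"] if include_expert else [])
--     base = total // len(levels)
--     remainder = total % len(levels)
--     plan = {level: base for level in levels}
--     for idx in range(remainder):
--         plan[levels[idx]] += 1
--     return plan
-- ===== SOURCE B (Python) =====
-- def _split_count_across_difficulties(total: int, include_expert: bool):
--     levels = ["easy", "medium", "hard"] + (["expert"] if include_expert else [])
--     plan = {}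
--     remaining = total
--     remaining_levels = len(levels)
--     for level in levels:
--         share = -(-remaining // remaining_levels)  # exact integer ceil
--         plan[level] = share
--         remaining -= share
--         remaining_levels -= 1
--     return plan
-- ===== Notes on version B (the rewrite author's own statement) =====
-- stated objective: alternative
-- what changed: Replaces the base=total//L, remainder=total%L computation and the separate +1 fix-up loop over the first `remainder` levels by a single pass over the levels that assigns each level the exact integer ceiling of remaining/remaining_levels and decrements both running values.
import Mathlib
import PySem

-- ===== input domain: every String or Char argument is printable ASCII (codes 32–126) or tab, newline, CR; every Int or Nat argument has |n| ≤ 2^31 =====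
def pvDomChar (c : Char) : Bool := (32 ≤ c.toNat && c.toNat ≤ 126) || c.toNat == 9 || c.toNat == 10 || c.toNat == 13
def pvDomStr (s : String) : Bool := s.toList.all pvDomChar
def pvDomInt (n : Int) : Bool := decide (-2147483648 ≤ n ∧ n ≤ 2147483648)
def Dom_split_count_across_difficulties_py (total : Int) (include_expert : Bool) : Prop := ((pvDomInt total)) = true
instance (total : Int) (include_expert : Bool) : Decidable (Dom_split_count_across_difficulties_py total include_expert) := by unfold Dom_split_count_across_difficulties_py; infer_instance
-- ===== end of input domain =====

-- B replaces the base//remainder arithmetic by a ceil-division countdown loop over the levels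
-- (objective: alternative decomposition, same cost).


-- ===== PORT A =====
def split_count_across_difficulties_py (total : Int) (include_expert : Bool) : List (String × Int) :=
  let levels : List String := ["easy", "medium", "hard"] ++ (if include_expert then ["expert"] else [])
  let base : Int := PySem.Int.floordiv total (levels.length : Int)
  let remainder : Int := PySem.Int.mod total (levels.length : Int)
  let plan : PySem.Dict String Int := levels.foldl (fun d lv => d.insert lv base) PySem.Dict.empty
  let plan := (PySem.List.pyRange 0 remainder 1).foldl
    (fun d idx =>
      match PySem.List.pyGet? levels idx with
      | some lv => d.modify lv 0 (· + 1)     -- plan[levels[idx]] += 1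
      | none => d)                           -- unreachable: idx < remainder < len(levels)
    plan
  plan.items

-- ===== PORT B =====
def split_count_across_difficulties_py_alt (total : Int) (include_expert : Bool) : List (String × Int) :=
  let levels : List String := ["easy", "medium", "hard"] ++ (if include_expert then ["expert"] else [])
  let res := levels.foldl
    (fun (st : PySem.Dict String Int × Int × Int) lv =>
      let share := -(PySem.Int.floordiv (-st.2.1) st.2.2)   -- -(-remaining // remaining_levels)
      (st.1.insert lv share, st.2.1 - share, st.2.2 - 1))
    ((PySem.Dict.empty : PySem.Dict String Int), total, (levels.length : Int))
  res.1.items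

-- ===== PRECONDITION & SPEC =====
def Spec_split_count_across_difficulties_py (total : Int) (include_expert : Bool) (out : List (String × Int)) : Prop := out = split_count_across_difficulties_py_alt total include_expert
instance (total : Int) (include_expert : Bool) (out : List (String × Int)) : Decidable (Spec_split_count_across_difficulties_py total include_expert out) := by unfold Spec_split_count_across_difficulties_py; infer_instance

-- ===== CLAIM (what is proved, stated in full; the proofs are below) =====
def Claim_equal_split_count_across_difficulties_py : Prop := ∀ (total : Int) (include_expert : Bool), Dom_split_count_across_difficulties_py total include_expert → Spec_split_count_across_difficulties_py total include_expert (split_count_across_difficulties_py total include_expert)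

-- ===== LEMMAS AND PROOFS =====

-- Without expert: case on total % 3, then both ports evaluate to literal 3-item plans
-- and the remaining division identities are linear arithmetic.
theorem split_eq_false (total : Int) :
    split_count_across_difficulties_py total false = split_count_across_difficulties_py_alt total false := by
  have hr : total % 3 = 0 ∨ total % 3 = 1 ∨ total % 3 = 2 := by omega
  rcases hr with hr | hr | hr <;>
    simp [split_count_across_difficulties_py, split_count_across_difficulties_py_alt, hr,
      PySem.List.pyRange, PySem.List.pyGet?, PySem.List.pyIdx?,
      PySem.Dict.insert, PySem.Dict.empty, PySem.Dict.modify,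
      PySem.Dict.contains, PySem.Dict.getD, PySem.Dict.get?, List.foldl, List.range_succ] <;>
    omega

-- With expert: same argument with total % 4.
theorem split_eq_true (total : Int) :
    split_count_across_difficulties_py total true = split_count_across_difficulties_py_alt total true := by
  have hr : total % 4 = 0 ∨ total % 4 = 1 ∨ total % 4 = 2 ∨ total % 4 = 3 := by omega
  rcases hr with hr | hr | hr | hr <;>
    simp [split_count_across_difficulties_py, split_count_across_difficulties_py_alt, hr,
      PySem.List.pyRange, PySem.List.pyGet?, PySem.List.pyIdx?,
      PySem.Dict.insert, PySem.Dict.empty, PySem.Dict.modify,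
      PySem.Dict.contains, PySem.Dict.getD, PySem.Dict.get?, List.foldl, List.range_succ] <;>
    omega

-- ===== VERDICT (by name: the statement is the Claim_ definition above) =====
theorem split_count_across_difficulties_py_spec : Claim_equal_split_count_across_difficulties_py := by
  intro total ie _
  unfold Spec_split_count_across_difficulties_py
  cases ie
  · exact split_eq_false total
  · exact split_eq_true total
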